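-- pv_equiv track=rewrite | github.com/iasomura/nextstep2026 | phishing_agent/precheck_module.py | _categorize_tld
-- ===== SOURCE A (Python) =====
-- from typing import Any, Dict, List, Optional, Tuple
--
-- _COMMON_SAFE_TLDS = {
--     "com", "net", "org",
--     "jp", "co.jp", "ne.jp", "ac.jp", "go.jp",
--     "edu", "gov",
-- }
--
-- def _categorize_tld(suffix: str, dangerous: List[str], legitimate: List[str], neutral: List[str]) -> str:
--     s = (suffix or "").lower().strip(".")
--
--     # Guard: common TLDs should never be treated as "dangerous"
--     if s in _COMMON_SAFE_TLDS:
--         return "legitimate"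
--
--     D = {x.lower().strip(".") for x in (dangerous or []) if x}
--     L = {x.lower().strip(".") for x in (legitimate or []) if x}
--     N = {x.lower().strip(".") for x in (neutral or []) if x}
--
--     if s in D: return "dangerous"
--     if s in L: return "legitimate"
--     if s in N: return "neutral"
--     return "unknown"
-- ===== SOURCE B (Python) =====
-- _COMMON_SAFE_TLDS = {
--     "com", "net", "org",
--     "jp", "co.jp", "ne.jp", "ac.jp", "go.jp",
--     "edu", "gov",
-- }
--
-- def _categorize_tld(suffix, dangerous, legitimate, neutral):
--     s = (suffix or "").lower().strip(".")
--
--     # Guard: common TLDs should never be treated as "dangerous"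
--     if s in _COMMON_SAFE_TLDS:
--         return "legitimate"
--
--     # Single pass with a max-priority accumulator: no sets, no branch chain.
--     # dangerous=3 > legitimate=2 > neutral=1, so the highest matching
--     # priority wins, which is exactly the required precedence.
--     best = 0
--     for prio, tlds in ((1, neutral), (2, legitimate), (3, dangerous)):
--         for x in (tlds or []):
--             if x and x.lower().strip(".") == s and best < prio:
--                 best = prio
--     return ("unknown", "neutral", "legitimate", "dangerous")[best]
-- ===== Notes on version B (the rewrite author's own statement) =====
-- stated objective: alternative
-- what changed: Replaces A's three normalized sets and the dangerous/legitimate/neutral if-chain by a single scan that folds a numeric max-priority accumulator over the tagged lists and indexes a name table with the result.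
import Mathlib
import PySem

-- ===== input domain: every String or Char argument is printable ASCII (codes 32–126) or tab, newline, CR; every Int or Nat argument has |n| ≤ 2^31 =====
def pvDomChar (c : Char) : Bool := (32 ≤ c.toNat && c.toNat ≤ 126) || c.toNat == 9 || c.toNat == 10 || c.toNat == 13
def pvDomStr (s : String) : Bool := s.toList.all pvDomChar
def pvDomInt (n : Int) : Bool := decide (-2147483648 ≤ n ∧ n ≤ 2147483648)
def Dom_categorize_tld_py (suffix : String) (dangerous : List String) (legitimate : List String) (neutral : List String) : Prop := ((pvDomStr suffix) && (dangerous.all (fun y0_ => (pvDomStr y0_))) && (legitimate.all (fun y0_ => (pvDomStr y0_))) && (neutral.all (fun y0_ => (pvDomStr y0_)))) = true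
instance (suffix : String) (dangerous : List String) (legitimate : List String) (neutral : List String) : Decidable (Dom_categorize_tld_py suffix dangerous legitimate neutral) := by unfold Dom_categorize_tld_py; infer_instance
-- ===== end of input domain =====

-- B replaces A's three sets and if-chain by one scan folding a numeric max-priority
-- accumulator over the tagged lists, then indexing a name table (objective: alternative).

-- ===== PORT A =====
-- x.lower().strip(".")
def pvNormA (x : String) : String := PySem.Str.stripChars (PySem.Str.lower x) "."

-- the module set _COMMON_SAFE_TLDS (only membership is used, so list order is irrelevant)
def pvSafeTlds : PySem.Set String :=
  PySem.Set.ofList ["com", "net", "org", "jp", "co.jp", "ne.jp", "ac.jp", "go.jp", "edu", "gov"]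

def categorize_tld_py (suffix : String) (dangerous : List String) (legitimate : List String) (neutral : List String) : String :=
  let s := pvNormA (if suffix = "" then "" else suffix)   -- (suffix or "")
  if PySem.Set.contains pvSafeTlds s then "legitimate" else
  let D := PySem.Set.ofList ((dangerous.filter (fun x => !(x == ""))).map pvNormA)
  let L := PySem.Set.ofList ((legitimate.filter (fun x => !(x == ""))).map pvNormA)
  let N := PySem.Set.ofList ((neutral.filter (fun x => !(x == ""))).map pvNormA)
  if PySem.Set.contains D s then "dangerous" else
  if PySem.Set.contains L s then "legitimate" else
  if PySem.Set.contains N s then "neutral" else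
  "unknown"

-- ===== PORT B =====
def pvNormB (x : String) : String := PySem.Str.stripChars (PySem.Str.lower x) "."

def pvSafeTldsB : PySem.Set String :=
  PySem.Set.ofList ["com", "net", "org", "jp", "co.jp", "ne.jp", "ac.jp", "go.jp", "edu", "gov"]

-- inner loop: for x in tlds: if x and norm(x) == s and best < prio: best = prio
def pvScan (s : String) (prio : Nat) (tlds : List String) (best : Nat) : Nat :=
  tlds.foldl (fun b x => if (!(x == "") && (pvNormB x == s) && decide (b < prio)) then prio else b) best

def categorize_tld_py_alt (suffix : String) (dangerous : List String) (legitimate : List String) (neutral : List String) : String :=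
  let s := pvNormB (if suffix = "" then "" else suffix)   -- (suffix or "")
  if PySem.Set.contains pvSafeTldsB s then "legitimate" else
  -- outer loop over ((1, neutral), (2, legitimate), (3, dangerous))
  let best := pvScan s 3 dangerous (pvScan s 2 legitimate (pvScan s 1 neutral 0))
  -- tuple indexing ("unknown","neutral","legitimate","dangerous")[best]; best ≤ 3 always
  (["unknown", "neutral", "legitimate", "dangerous"].getD best "unknown")

-- ===== PRECONDITION & SPEC =====
def Spec_categorize_tld_py (suffix : String) (dangerous : List String) (legitimate : List String) (neutral : List String) (out : String) : Prop := out = categorize_tld_py_alt suffix dangerous legitimate neutral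
instance (suffix : String) (dangerous : List String) (legitimate : List String) (neutral : List String) (out : String) : Decidable (Spec_categorize_tld_py suffix dangerous legitimate neutral out) := by unfold Spec_categorize_tld_py; infer_instance

-- ===== CLAIM =====
def Claim_equal_categorize_tld_py : Prop := ∀ (suffix : String) (dangerous : List String) (legitimate : List String) (neutral : List String), Dom_categorize_tld_py suffix dangerous legitimate neutral → Spec_categorize_tld_py suffix dangerous legitimate neutral (categorize_tld_py suffix dangerous legitimate neutral)

-- ===== LEMMAS AND PROOFS =====

-- the inner loop raises best to prio exactly when some normalized nonempty entry equals s
theorem pvScan_eq (s : String) (prio : Nat) (tlds : List String) (best : Nat) :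
    pvScan s prio tlds best
      = if tlds.any (fun x => !(x == "") && (pvNormB x == s)) && decide (best < prio)
        then prio else best := by
  induction tlds generalizing best with
  | nil => simp [pvScan]
  | cons x xs ih =>
    simp only [pvScan, List.foldl_cons, List.any_cons] at *
    by_cases hx : x = ""
    · rw [if_neg (by simp [hx]), ih]
      simp [hx]
    · by_cases hs : pvNormB x = s
      · by_cases hb : best < prio
        · rw [if_pos (by simp [hx, hs, hb])]
          rw [ih]
          simp [hx, hs, hb]
        · rw [if_neg (by simp [hs, hb])]
          rw [ih]
          simp [hs, hb]
      · rw [if_neg (by simp [hx, hs])]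
        rw [ih]
        simp [hx, hs]

-- A's set membership test, as the boolean `any` that pvScan_eq produces
theorem contains_normSet (l : List String) (s : String) :
    PySem.Set.contains (PySem.Set.ofList ((l.filter (fun x => !(x == ""))).map pvNormB)) s
      = l.any (fun x => !(x == "") && (pvNormB x == s)) := by
  rw [Bool.eq_iff_iff]
  simp only [PySem.Set.contains_iff, PySem.Set.mem_ofList, List.mem_map, List.mem_filter,
    List.any_eq_true, Bool.and_eq_true, beq_iff_eq]
  constructor
  · rintro ⟨x, ⟨hx, hne⟩, hk⟩; exact ⟨x, hx, hne, hk⟩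
  · rintro ⟨x, hx, hne, hk⟩; exact ⟨x, ⟨hx, hne⟩, hk⟩

-- ===== VERDICT =====
theorem categorize_tld_py_spec : Claim_equal_categorize_tld_py := by
  intro suffix dangerous legitimate neutral _
  show _ = _
  unfold categorize_tld_py categorize_tld_py_alt
  have hsame : pvNormA = pvNormB := rfl
  have hsafe : pvSafeTlds = pvSafeTldsB := rfl
  simp only [hsame, hsafe]
  by_cases h0 : PySem.Set.contains pvSafeTldsB (pvNormB (if suffix = "" then "" else suffix)) = true
  · rw [if_pos h0, if_pos h0]
  · rw [if_neg h0, if_neg h0]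
    rw [pvScan_eq, pvScan_eq, pvScan_eq, contains_normSet, contains_normSet, contains_normSet]
    set s := pvNormB (if suffix = "" then "" else suffix)
    by_cases hD : dangerous.any (fun x => !(x == "") && (pvNormB x == s)) = true <;>
      by_cases hL : legitimate.any (fun x => !(x == "") && (pvNormB x == s)) = true <;>
        by_cases hN : neutral.any (fun x => !(x == "") && (pvNormB x == s)) = true <;>
          simp [hD, hL, hN]
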